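-- pv_equiv track=rewrite | github.com/francocontigo/lazy_dungeon_master | lazydm/utils/encounters.py | encounter_level_number_of_players
-- ===== SOURCE A (Python) =====
-- TABLE = [
--     [25, 50, 75, 100],
--     [50, 100, 150, 200],
--     [75, 150, 225, 400],
--     [125, 250, 375, 500],
--     [250, 500, 750, 1100],
--     [300, 600, 900, 1400],
--     [350, 750, 1100, 1700],
--     [450, 900, 1400, 2100],
--     [550, 1100, 1600, 2400],
--     [600, 1200, 1900, 2800],
--     [800, 1500, 2400, 3600],
--     [1000, 2000, 3000, 4500],
--     [1100, 2200, 3400, 5100],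
--     [1250, 2500, 3800, 5700],
--     [1400, 2800, 4300, 6500],
--     [1600, 3200, 4800, 7200],
--     [2000, 3900, 5900, 8800],
--     [2100, 4200, 6300, 9500],
--     [2400, 4500, 7300, 10900],
--     [2800, 5700, 8500, 12700],
-- ]
--
-- def encounter_level_number_of_players(players: list) -> list:
--     """Returns the recommended XP of the encounter
--
--     Args:
--         players (list): list of lists where each sublist contains the number of players and their level
--
--     Returns:
--         list: a list of recommended xp for encounter
--     """
--     recommended_xp = []
--
--     try:
--         for num_players, level in players:
--             recommended = [xp * num_players for xp in TABLE[level - 1]]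
--             recommended_xp.append(recommended)
--     except ValueError:
--         return []
--
--     if len(recommended_xp) > 1:
--         sums = [0] * len(recommended_xp[0])
--
--         for xp_list in recommended_xp:
--             for i in range(len(xp_list)):
--                 sums[i] += xp_list[i]
--
--         return sums
--     else:
--         return recommended_xp[0] if recommended_xp else []
-- ===== SOURCE B (Python) =====
-- TABLE = [
--     [25, 50, 75, 100],
--     [50, 100, 150, 200],
--     [75, 150, 225, 400],
--     [125, 250, 375, 500],
--     [250, 500, 750, 1100],
--     [300, 600, 900, 1400],
--     [350, 750, 1100, 1700],
--     [450, 900, 1400, 2100],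
--     [550, 1100, 1600, 2400],
--     [600, 1200, 1900, 2800],
--     [800, 1500, 2400, 3600],
--     [1000, 2000, 3000, 4500],
--     [1100, 2200, 3400, 5100],
--     [1250, 2500, 3800, 5700],
--     [1400, 2800, 4300, 6500],
--     [1600, 3200, 4800, 7200],
--     [2000, 3900, 5900, 8800],
--     [2100, 4200, 6300, 9500],
--     [2400, 4500, 7300, 10900],
--     [2800, 5700, 8500, 12700],
-- ]
--
-- def encounter_level_number_of_players(players: list) -> list:
--     """Single-pass version: one running sum vector instead of building all
--     per-player rows first and summing them in a second phase."""
--     sums = None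
--     try:
--         for num_players, level in players:
--             row = TABLE[level - 1]
--             if sums is None:
--                 sums = [0] * len(row)
--             for i, xp in enumerate(row):
--                 sums[i] += xp * num_players
--     except ValueError:
--         return []
--     return [] if sums is None else sums
-- ===== Notes on version B (the rewrite author's own statement) =====
-- stated objective: simpler
-- what changed: B fuses A's two phases (build the full list of per-player scaled rows, then sum them column-wise with a separate nested loop and a length>1/singleton/empty case split) into one pass that keeps a single running sum vector initialised lazily from the first table row, so no intermediate list of rows and no final case analysis is needed.
import Mathlib
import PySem

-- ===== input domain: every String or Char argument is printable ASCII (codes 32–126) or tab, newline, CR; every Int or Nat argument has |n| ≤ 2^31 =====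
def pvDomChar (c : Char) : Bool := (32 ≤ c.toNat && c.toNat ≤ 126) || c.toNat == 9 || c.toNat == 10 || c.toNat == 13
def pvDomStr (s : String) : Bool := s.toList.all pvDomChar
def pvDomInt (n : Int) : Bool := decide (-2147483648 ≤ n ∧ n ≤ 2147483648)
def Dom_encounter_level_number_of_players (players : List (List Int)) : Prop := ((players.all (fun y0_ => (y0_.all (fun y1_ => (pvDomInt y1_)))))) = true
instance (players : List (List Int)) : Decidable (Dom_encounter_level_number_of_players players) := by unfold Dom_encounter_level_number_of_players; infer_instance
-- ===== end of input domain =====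

-- B fuses A's build-all-rows-then-sum two-phase loop into one running accumulator pass (objective: simpler).

-- shared module constant TABLE
def pyTABLE : List (List Int) := [
  [25, 50, 75, 100], [50, 100, 150, 200], [75, 150, 225, 400], [125, 250, 375, 500],
  [250, 500, 750, 1100], [300, 600, 900, 1400], [350, 750, 1100, 1700], [450, 900, 1400, 2100],
  [550, 1100, 1600, 2400], [600, 1200, 1900, 2800], [800, 1500, 2400, 3600], [1000, 2000, 3000, 4500],
  [1100, 2200, 3400, 5100], [1250, 2500, 3800, 5700], [1400, 2800, 4300, 6500], [1600, 3200, 4800, 7200],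
  [2000, 3900, 5900, 8800], [2100, 4200, 6300, 9500], [2400, 4500, 7300, 10900], [2800, 5700, 8500, 12700]]

-- ===== PORT A =====
-- the try/for loop: none = IndexError (excluded by Pre_), some none = ValueError (caught: return []),
-- some (some rows) = the accumulated recommended_xp list
def pvALoop : List (List Int) → List (List Int) → Option (Option (List (List Int)))
  | acc, [] => some (some acc)
  | acc, p :: rest =>
    match p with
    | [num_players, level] =>
      match PySem.List.pyGet? pyTABLE (level - 1) with
      | some row => pvALoop (acc ++ [row.map (fun xp => xp * num_players)]) rest
      | none => none
    | _ => some none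

def encounter_level_number_of_players (players : List (List Int)) : List Int :=
  match pvALoop [] players with
  | none => []         -- IndexError: excluded by Pre_
  | some none => []    -- except ValueError: return []
  | some (some recommended_xp) =>
    if recommended_xp.length > 1 then
      let sums0 : List Int := List.replicate (recommended_xp.headD []).length 0
      recommended_xp.foldl
        (fun sums xp_list =>
          (List.range xp_list.length).foldl
            (fun s i => s.set i (s.getD i 0 + xp_list.getD i 0)) sums)
        sums0
    else
      match recommended_xp with
      | [] => []
      | r :: _ => r

-- ===== PORT B =====
-- same exception encoding: none = IndexError (excluded by Pre_), some none = ValueError (caught),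
-- some (some sums) = the running accumulator (Python's `sums`, possibly still None)
def pvBLoop : Option (List Int) → List (List Int) → Option (Option (Option (List Int)))
  | sums, [] => some (some sums)
  | sums, p :: rest =>
    match p with
    | [num_players, level] =>
      match PySem.List.pyGet? pyTABLE (level - 1) with
      | some row =>
        let s := match sums with
          | none => List.replicate row.length 0
          | some s => s
        pvBLoop (some ((PySem.List.enumerate row).foldl
          (fun s p => s.set p.1.toNat (s.getD p.1.toNat 0 + p.2 * num_players)) s)) rest
      | none => none
    | _ => some none

def encounter_level_number_of_players_alt (players : List (List Int)) : List Int :=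
  match pvBLoop none players with
  | none => []               -- IndexError: excluded by Pre_
  | some none => []          -- except ValueError: return []
  | some (some none) => []   -- sums is None
  | some (some (some sums)) => sums

-- ===== PRECONDITION & SPEC =====
-- Pre_ excludes exactly the inputs where A raises an uncaught IndexError: some entry in the
-- leading run of length-2 sublists has a level outside [-19, 20] (TABLE[level-1] out of range).
def Pre_encounter_level_number_of_players (players : List (List Int)) : Prop :=
  ∀ p ∈ players.takeWhile (fun p => p.length == 2), -19 ≤ p.getD 1 0 ∧ p.getD 1 0 ≤ 20

instance (players : List (List Int)) : Decidable (Pre_encounter_level_number_of_players players) := by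
  unfold Pre_encounter_level_number_of_players; infer_instance

def pvWitness_encounter_level_number_of_players : List (List Int) := [[3, 2], [2, 5]]

def Spec_encounter_level_number_of_players (players : List (List Int)) (out : List Int) : Prop := out = encounter_level_number_of_players_alt players
instance (players : List (List Int)) (out : List Int) : Decidable (Spec_encounter_level_number_of_players players out) := by unfold Spec_encounter_level_number_of_players; infer_instance

-- ===== CLAIM (what is proved, stated in full; the proofs are below) =====
def Claim_equal_encounter_level_number_of_players : Prop := ∀ (players : List (List Int)), Dom_encounter_level_number_of_players players → Pre_encounter_level_number_of_players players → Spec_encounter_level_number_of_players players (encounter_level_number_of_players players)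


-- ===== LEMMAS AND PROOFS =====

-- every TABLE row has length 4
theorem pvTableRowLen {i : Int} {r : List Int} (h : PySem.List.pyGet? pyTABLE i = some r) :
    r.length = 4 := by
  have hm := PySem.List.mem_of_pyGet?_eq_some pyTABLE h
  have hall : ∀ x ∈ pyTABLE, x.length = 4 := by decide
  exact hall r hm

theorem pvLen4 (r : List Int) (h : r.length = 4) : ∃ a b c d, r = [a, b, c, d] := by
  rcases r with _ | ⟨a, _ | ⟨b, _ | ⟨c, _ | ⟨d, _ | ⟨e, t⟩⟩⟩⟩⟩ <;> simp at h
  exact ⟨a, b, c, d, rfl⟩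

-- A's inner summation loop on two length-4 lists is pointwise addition
theorem pvAddA4 (a b c d w x y z : Int) :
    (List.range ([w, x, y, z] : List Int).length).foldl
      (fun s i => s.set i (s.getD i 0 + [w, x, y, z].getD i 0)) [a, b, c, d]
      = [a + w, b + x, c + y, d + z] := by
  have h4 : ([w, x, y, z] : List Int).length = 4 := rfl
  have hr : List.range 4 = [0, 1, 2, 3] := rfl
  rw [h4, hr]; simp [List.foldl, List.getD]

-- A's outer summation loop equals a fold of pointwise additions
theorem pvFoldA_eq (rows : List (List Int)) :
    ∀ (s : List Int), s.length = 4 → (∀ r ∈ rows, r.length = 4) →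
    rows.foldl
      (fun sums xp_list =>
        (List.range xp_list.length).foldl
          (fun s i => s.set i (s.getD i 0 + xp_list.getD i 0)) sums) s
      = rows.foldl (fun t r => List.zipWith (· + ·) t r) s := by
  induction rows with
  | nil => intro s _ _; rfl
  | cons r rows ih =>
    intro s hs hlen
    obtain ⟨a, b, c, d, rfl⟩ := pvLen4 s hs
    obtain ⟨w, x, y, z, rfl⟩ := pvLen4 r (hlen r (by simp))
    simp only [List.foldl_cons, pvAddA4]
    rw [ih [a + w, b + x, c + y, d + z] (by simp) (fun r hr => hlen r (by simp [hr]))]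
    norm_num

-- Pre_ restricted to a cons
theorem pvPreCons {p : List Int} {rest : List (List Int)}
    (h : Pre_encounter_level_number_of_players (p :: rest)) (hp : p.length = 2) :
    (-19 ≤ p.getD 1 0 ∧ p.getD 1 0 ≤ 20) ∧ Pre_encounter_level_number_of_players rest := by
  unfold Pre_encounter_level_number_of_players at *
  rw [List.takeWhile_cons] at h
  simp only [hp] at h
  simp only [beq_self_eq_true, if_true, List.mem_cons] at h
  exact ⟨h p (Or.inl rfl), fun q hq => h q (Or.inr hq)⟩

-- on a valid level the table lookup succeeds
theorem pvLookupSome {l : Int} (h1 : -19 ≤ l) (h2 : l ≤ 20) :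
    ∃ r, PySem.List.pyGet? pyTABLE (l - 1) = some r := by
  cases hr : PySem.List.pyGet? pyTABLE (l - 1) with
  | none =>
    rw [PySem.List.pyGet?_eq_none_iff] at hr
    exfalso; apply hr
    have h20 : pyTABLE.length = 20 := by decide
    simp [PySem.Raise.InRange, h20]; omega
  | some r => exact ⟨r, rfl⟩

-- core relation between the two loops, after the first row has initialised B's accumulator
theorem pvLoopRel (ps : List (List Int)) :
    ∀ (acc : List (List Int)) (s : List Int), s.length = 4 →
    Pre_encounter_level_number_of_players ps →
    (pvALoop acc ps = some none ∧ pvBLoop (some s) ps = some none) ∨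
    ∃ rows, pvALoop acc ps = some (some (acc ++ rows)) ∧ (∀ r ∈ rows, r.length = 4) ∧
      pvBLoop (some s) ps = some (some (some
        (rows.foldl (fun t r => List.zipWith (· + ·) t r) s))) := by
  induction ps with
  | nil =>
    intro acc s _ _
    right; exact ⟨[], by simp [pvALoop], by simp, by simp [pvBLoop]⟩
  | cons p rest ih =>
    intro acc s hs hpre
    rcases p with _ | ⟨n, _ | ⟨l, _ | ⟨e, t⟩⟩⟩
    · left; exact ⟨rfl, rfl⟩
    · left; exact ⟨rfl, rfl⟩
    · -- p = [n, l]
      obtain ⟨⟨h1, h2⟩, hrest⟩ := pvPreCons hpre (by simp)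
      simp only [List.getD] at h1 h2
      obtain ⟨row, hrow⟩ := pvLookupSome (by simpa using h1) (by simpa using h2)
      obtain ⟨w, x, y, z, rfl⟩ := pvLen4 row (pvTableRowLen hrow)
      obtain ⟨a, b, c, d, rfl⟩ := pvLen4 s hs
      have hA : pvALoop acc ([n, l] :: rest)
          = pvALoop (acc ++ [[w * n, x * n, y * n, z * n]]) rest := by
        simp [pvALoop, hrow]
      have hB : pvBLoop (some [a, b, c, d]) ([n, l] :: rest)
          = pvBLoop (some [a + w * n, b + x * n, c + y * n, d + z * n]) rest := by
        simp [pvBLoop, hrow]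

      rcases ih (acc ++ [[w * n, x * n, y * n, z * n]])
          [a + w * n, b + x * n, c + y * n, d + z * n] (by simp) hrest with
        ⟨hA', hB'⟩ | ⟨rows, hA', hlen, hB'⟩
      · left; exact ⟨hA.trans hA', hB.trans hB'⟩
      · right
        refine ⟨[w * n, x * n, y * n, z * n] :: rows, ?_, ?_, ?_⟩
        · rw [hA, hA']; simp
        · intro r hr; rcases List.mem_cons.mp hr with hr | hr
          · simp [hr]
          · exact hlen r hr
        · rw [hB, hB']
          simp [List.foldl_cons]
    · left; exact ⟨rfl, rfl⟩

-- ===== VERDICT (by name: the statement is the Claim_ definition above) =====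
theorem encounter_level_number_of_players_spec : Claim_equal_encounter_level_number_of_players := by
  intro players _ hpre
  unfold Spec_encounter_level_number_of_players
  unfold encounter_level_number_of_players encounter_level_number_of_players_alt
  rcases players with _ | ⟨p, rest⟩
  · rfl
  rcases p with _ | ⟨n, _ | ⟨l, _ | ⟨e, t⟩⟩⟩
  · rfl
  · rfl
  case cons.cons.cons.nil =>
    -- p = [n, l]
    obtain ⟨⟨h1, h2⟩, hrest⟩ := pvPreCons hpre (by simp)
    simp only [List.getD] at h1 h2
    obtain ⟨row, hrow⟩ := pvLookupSome (by simpa using h1) (by simpa using h2)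
    obtain ⟨w, x, y, z, rfl⟩ := pvLen4 row (pvTableRowLen hrow)
    have hA : pvALoop [] ([n, l] :: rest)
        = pvALoop [[w * n, x * n, y * n, z * n]] rest := by
      simp [pvALoop, hrow]
    have hB : pvBLoop none ([n, l] :: rest)
        = pvBLoop (some [w * n, x * n, y * n, z * n]) rest := by
      simp [pvBLoop, hrow, PySem.List.enumerate, List.foldl, List.getD]
    rcases pvLoopRel rest [[w * n, x * n, y * n, z * n]]
        [w * n, x * n, y * n, z * n] (by simp) hrest with
      ⟨hA', hB'⟩ | ⟨rows, hA', hlen, hB'⟩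
    · rw [hA, hA', hB, hB']
    · rw [hA, hA', hB, hB']
      rcases rows with _ | ⟨r, rows⟩
      · simp
      · simp only [List.cons_append, List.nil_append]
        have hgt : ([w * n, x * n, y * n, z * n] :: r :: rows).length > 1 := by simp
        rw [if_pos hgt]
        have hall : ∀ q ∈ ([w * n, x * n, y * n, z * n] :: r :: rows), q.length = 4 := by
          intro q hq
          rcases List.mem_cons.mp hq with hq | hq
          · simp [hq]
          · exact hlen q hq
        rw [pvFoldA_eq _ _ (by simp) hall]
        simp [List.foldl_cons]
  case cons.cons.cons.cons => rfl

-- A raises IndexError on a level outside [-19, 20]; B raises there too, so nothing is claimed.
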